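-- pv_equiv track=rewrite | github.com/qusers/Q | david-refactor_notebooks/restraint_setting.py | map_rings_between_molecules
-- ===== SOURCE A (Python) =====
-- def map_rings_between_molecules(ringsA, ringsB, atom_mapping): # TODO: test when you don't have respective ring
--     """Map rings between molecules based on atom mapping."""
--     ring_mapping = {}  # Maps ring indices in A to ring indices in B
--     for idxA, atomsA in ringsA.items():
--         for idxB, atomsB in ringsB.items():
--             if all(atom_mapping.get(a) in atomsB for a in atomsA):
--                 ring_mapping[idxA] = idxB
--                 break
--     return ring_mapping
-- ===== SOURCE B (Python) =====
-- def map_rings_between_molecules(ringsA, ringsB, atom_mapping):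
--     """Map rings between molecules based on atom mapping.
--
--     Build an index from each B-atom to the set of B-ring positions containing
--     it, then for each A-ring intersect its mapped atoms' candidate positions
--     (starting from all positions) and take the earliest surviving B ring."""
--     idxB_list = list(ringsB)
--     rings_of_atom = {}
--     for pos, atomsB in enumerate(ringsB.values()):
--         for atom in atomsB:
--             rings_of_atom.setdefault(atom, set()).add(pos)
--     ring_mapping = {}
--     for idxA, atomsA in ringsA.items():
--         cands = set(range(len(idxB_list)))
--         for a in atomsA:
--             cands &= rings_of_atom.get(atom_mapping.get(a), set())
--             if not cands:
--                 break
--         if cands: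
--             ring_mapping[idxA] = idxB_list[min(cands)]
--     return ring_mapping
-- ===== Notes on version B (the rewrite author's own statement) =====
-- stated objective: faster
-- what changed: Instead of re-scanning every B-ring's atom list for every A-ring, B builds in one pass an index from atom to the set of B-ring positions containing it, then for each A-ring intersects its mapped atoms' candidate-position sets (starting from all positions) and picks the earliest surviving position.
import Mathlib
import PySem

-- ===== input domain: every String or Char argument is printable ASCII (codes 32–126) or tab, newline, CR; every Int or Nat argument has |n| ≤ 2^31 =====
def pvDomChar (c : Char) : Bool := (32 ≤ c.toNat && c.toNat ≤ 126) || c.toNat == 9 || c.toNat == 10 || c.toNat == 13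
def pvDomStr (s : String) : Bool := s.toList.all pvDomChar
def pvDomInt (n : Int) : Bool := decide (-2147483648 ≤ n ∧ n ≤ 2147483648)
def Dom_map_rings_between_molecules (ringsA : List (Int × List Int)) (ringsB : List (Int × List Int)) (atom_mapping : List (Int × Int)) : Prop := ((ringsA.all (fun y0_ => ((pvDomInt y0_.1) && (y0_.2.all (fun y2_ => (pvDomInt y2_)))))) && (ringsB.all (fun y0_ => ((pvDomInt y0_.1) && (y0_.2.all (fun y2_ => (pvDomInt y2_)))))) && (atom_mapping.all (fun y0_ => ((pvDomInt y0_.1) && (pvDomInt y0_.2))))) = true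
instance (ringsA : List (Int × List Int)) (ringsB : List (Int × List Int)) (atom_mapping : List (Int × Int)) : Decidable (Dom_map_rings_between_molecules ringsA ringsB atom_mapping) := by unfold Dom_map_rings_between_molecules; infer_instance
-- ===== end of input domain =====

-- B replaces A's scan of all B-rings per A-ring by a one-pass atom→B-ring-positions index,
-- intersecting the candidate position sets of an A-ring's mapped atoms and taking the earliest.

-- ===== PORT A =====
-- all(atom_mapping.get(a) in atomsB for a in atomsA)  (a missing mapping gives None, never in atomsB)
def pvCondA (dm : PySem.Dict Int Int) (atomsA atomsB : List Int) : Bool :=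
  atomsA.all (fun a =>
    match dm.get? a with
    | some v => atomsB.contains v
    | none => false)

-- the inner 'for idxB, atomsB in ringsB.items(): … break'
def pvFindB (dm : PySem.Dict Int Int) (atomsA : List Int) : List (Int × List Int) → Option Int
  | [] => none
  | pb :: rest => if pvCondA dm atomsA pb.2 then some pb.1 else pvFindB dm atomsA rest

def map_rings_between_molecules (ringsA : List (Int × List Int)) (ringsB : List (Int × List Int)) (atom_mapping : List (Int × Int)) : List (Int × Int) :=
  let dm := PySem.Dict.ofList atom_mapping
  let bItems := (PySem.Dict.ofList ringsB).items
  ((PySem.Dict.ofList ringsA).items.foldl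
    (fun (rm : PySem.Dict Int Int) pA =>
      match pvFindB dm pA.2 bItems with
      | some idxB => rm.insert pA.1 idxB
      | none => rm) PySem.Dict.empty).items

-- ===== PORT B =====
-- 'for pos, atomsB in enumerate(ringsB.values()): for atom in atomsB: rings_of_atom.setdefault(atom, set()).add(pos)'
def pvIndexB (bvals : List (List Int)) : PySem.Dict Int (PySem.Set Int) :=
  (PySem.List.enumerate bvals).foldl
    (fun d pa =>
      pa.2.foldl
        (fun d atom =>
          match d.get? atom with
          | none => d.insert atom (PySem.Set.ofList [pa.1])
          | some s => d.insert atom (PySem.Set.add s pa.1)) d)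
    PySem.Dict.empty

-- 'rings_of_atom.get(atom_mapping.get(a), set())' (a missing mapping gives None, never a key of rings_of_atom)
def pvAtomSet (dm : PySem.Dict Int Int) (idx : PySem.Dict Int (PySem.Set Int)) (a : Int) : PySem.Set Int :=
  match dm.get? a with
  | none => PySem.Set.empty
  | some m => idx.getD m PySem.Set.empty

-- the 'for a in atomsA: cands &= …; if not cands: break' loop
def pvCandLoop (dm : PySem.Dict Int Int) (idx : PySem.Dict Int (PySem.Set Int)) :
    List Int → PySem.Set Int → PySem.Set Int
  | [], c => c
  | a :: rest, c =>
    let c' := PySem.Set.inter c (pvAtomSet dm idx a)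
    if c'.isEmpty then c' else pvCandLoop dm idx rest c'

def map_rings_between_molecules_alt (ringsA : List (Int × List Int)) (ringsB : List (Int × List Int)) (atom_mapping : List (Int × Int)) : List (Int × Int) :=
  let bItems := (PySem.Dict.ofList ringsB).items
  let idxBList := bItems.map (·.1)
  let ringsOfAtom := pvIndexB (bItems.map (·.2))
  let dm := PySem.Dict.ofList atom_mapping
  ((PySem.Dict.ofList ringsA).items.foldl
    (fun (rm : PySem.Dict Int Int) pA =>
      let c := pvCandLoop dm ringsOfAtom pA.2
        (PySem.Set.ofList (PySem.List.pyRange 0 (idxBList.length : Int) 1))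
      match PySem.List.min? c id with
      | some p => rm.insert pA.1 (idxBList.getD p.toNat 0)
      | none => rm) PySem.Dict.empty).items

-- ===== PRECONDITION & SPEC =====
def Spec_map_rings_between_molecules (ringsA : List (Int × List Int)) (ringsB : List (Int × List Int)) (atom_mapping : List (Int × Int)) (out : List (Int × Int)) : Prop := out = map_rings_between_molecules_alt ringsA ringsB atom_mapping
instance (ringsA : List (Int × List Int)) (ringsB : List (Int × List Int)) (atom_mapping : List (Int × Int)) (out : List (Int × Int)) : Decidable (Spec_map_rings_between_molecules ringsA ringsB atom_mapping out) := by unfold Spec_map_rings_between_molecules; infer_instance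

-- ===== CLAIM (what is proved, stated in full; the proofs are below) =====
def Claim_equal_map_rings_between_molecules : Prop := ∀ (ringsA : List (Int × List Int)) (ringsB : List (Int × List Int)) (atom_mapping : List (Int × Int)), Dom_map_rings_between_molecules ringsA ringsB atom_mapping → Spec_map_rings_between_molecules ringsA ringsB atom_mapping (map_rings_between_molecules ringsA ringsB atom_mapping)

-- ===== LEMMAS AND PROOFS =====

-- 'position p is registered for atom m in the index d'
def pvMemD (d : PySem.Dict Int (PySem.Set Int)) (m p : Int) : Prop :=
  ∃ s, d.get? m = some s ∧ p ∈ s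

theorem pvMemD_innerFold (q : Int) :
    ∀ (atoms : List Int) (d : PySem.Dict Int (PySem.Set Int)) (m p : Int),
    pvMemD (atoms.foldl
      (fun d atom =>
        match d.get? atom with
        | none => d.insert atom (PySem.Set.ofList [q])
        | some s => d.insert atom (PySem.Set.add s q)) d) m p
      ↔ pvMemD d m p ∨ (p = q ∧ m ∈ atoms) := by
  intro atoms
  induction atoms with
  | nil => simp [pvMemD]
  | cons a rest ih =>
    intro d m p
    rw [List.foldl_cons, ih]
    have hstep : pvMemD (match d.get? a with
        | none => d.insert a (PySem.Set.ofList [q])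
        | some s => d.insert a (PySem.Set.add s q)) m p ↔ pvMemD d m p ∨ (p = q ∧ m = a) := by
      cases hg : d.get? a with
      | none =>
        simp only [pvMemD, PySem.Dict.get?_insert]
        by_cases hma : m = a
        · subst hma
          simp [hg, PySem.Set.ofList, PySem.Set.add, eq_comm]
        · simp [hma]
      | some s =>
        simp only [pvMemD, PySem.Dict.get?_insert]
        by_cases hma : m = a
        · subst hma
          simp [hg, PySem.Set.mem_add, eq_comm]
        · simp [hma]
    rw [hstep]
    simp [List.mem_cons]
    tauto

theorem pvMemD_indexGo :
    ∀ (bvals : List (List Int)) (s0 : Int) (d : PySem.Dict Int (PySem.Set Int)) (m p : Int),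
    pvMemD ((PySem.List.enumerate bvals s0).foldl
      (fun d pa =>
        pa.2.foldl
          (fun d atom =>
            match d.get? atom with
            | none => d.insert atom (PySem.Set.ofList [pa.1])
            | some s => d.insert atom (PySem.Set.add s pa.1)) d) d) m p
      ↔ pvMemD d m p ∨ ∃ k, ∃ _ : k < bvals.length, p = s0 + k ∧ m ∈ bvals[k] := by
  intro bvals
  induction bvals with
  | nil => simp [PySem.List.enumerate]
  | cons v rest ih =>
    intro s0 d m p
    rw [PySem.List.enumerate_cons, List.foldl_cons, ih, pvMemD_innerFold]
    constructor
    · rintro ((h | ⟨hp, hm⟩) | ⟨k, hk, hp, hm⟩)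
      · exact Or.inl h
      · exact Or.inr ⟨0, by simp, by simpa using hp, by simpa using hm⟩
      · exact Or.inr ⟨k + 1, by simpa using hk, by push_cast at hp ⊢; omega, by simpa using hm⟩
    · rintro (h | ⟨k, hk, hp, hm⟩)
      · exact Or.inl (Or.inl h)
      · cases k with
        | zero => exact Or.inl (Or.inr ⟨by simpa using hp, by simpa using hm⟩)
        | succ k =>
          exact Or.inr ⟨k, by simpa using hk, by push_cast at hp ⊢; omega, by simpa using hm⟩

theorem pvMemD_empty (m p : Int) : ¬ pvMemD PySem.Dict.empty m p := by
  simp [pvMemD, PySem.Dict.get?_empty]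

theorem pvMemD_indexB (bvals : List (List Int)) (m p : Int) :
    pvMemD (pvIndexB bvals) m p ↔ ∃ k, ∃ _ : k < bvals.length, p = (k : Int) ∧ m ∈ bvals[k] := by
  rw [pvIndexB, pvMemD_indexGo]
  simp only [zero_add]
  constructor
  · rintro (h | h)
    · exact absurd h (pvMemD_empty m p)
    · exact h
  · exact Or.inr

theorem pvMem_atomSet (dm : PySem.Dict Int Int) (idx : PySem.Dict Int (PySem.Set Int)) (a p : Int) :
    p ∈ pvAtomSet dm idx a ↔ ∃ m, dm.get? a = some m ∧ pvMemD idx m p := by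
  cases hg : dm.get? a with
  | none => simp [pvAtomSet, hg, PySem.Set.empty]
  | some m =>
    simp only [pvAtomSet, hg, PySem.Dict.getD_eq_get?_getD]
    cases hs : idx.get? m with
    | none =>
      simp only [Option.getD_none, PySem.Set.empty, List.not_mem_nil, false_iff]
      rintro ⟨m', hm', s', hs', -⟩
      rw [Option.some_inj] at hm'; subst hm'
      rw [hs] at hs'; simp at hs'
    | some s =>
      simp only [Option.getD_some]
      constructor
      · intro h; exact ⟨m, rfl, s, hs, h⟩
      · rintro ⟨m', hm', s', hs', hp⟩
        rw [Option.some_inj] at hm'; subst hm'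
        rw [hs, Option.some_inj] at hs'; subst hs'
        exact hp

theorem pvCandLoop_mem (dm : PySem.Dict Int Int) (idx : PySem.Dict Int (PySem.Set Int)) :
    ∀ (atoms : List Int) (c0 : PySem.Set Int) (p : Int),
    p ∈ pvCandLoop dm idx atoms c0 ↔
      p ∈ c0 ∧ ∀ a ∈ atoms, ∃ m, dm.get? a = some m ∧ pvMemD idx m p := by
  intro atoms
  induction atoms with
  | nil => intro c0 p; simp [pvCandLoop]
  | cons a rest ih =>
    intro c0 p
    rw [pvCandLoop]
    have hmem1 : p ∈ PySem.Set.inter c0 (pvAtomSet dm idx a) ↔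
        p ∈ c0 ∧ ∃ m, dm.get? a = some m ∧ pvMemD idx m p := by
      rw [PySem.Set.mem_inter, pvMem_atomSet]
    by_cases he : (PySem.Set.inter c0 (pvAtomSet dm idx a)).isEmpty
    · rw [if_pos he]
      rw [List.isEmpty_iff] at he
      constructor
      · intro hp; rw [he] at hp; simp at hp
      · rintro ⟨h0, hall⟩
        have := hmem1.mpr ⟨h0, hall a (by simp)⟩
        rw [he] at this; simp at this
    · rw [if_neg he, ih, hmem1]
      constructor
      · rintro ⟨⟨h0, hA⟩, hrest⟩
        refine ⟨h0, ?_⟩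
        intro x hx
        rcases List.mem_cons.mp hx with h | h
        · subst h; exact hA
        · exact hrest x h
      · rintro ⟨h0, hall⟩
        exact ⟨⟨h0, hall a (by simp)⟩, fun x hx => hall x (by simp [hx])⟩

theorem pvFindB_min (dm : PySem.Dict Int Int) (atoms : List Int) :
    ∀ (l : List (Int × List Int)) (b : Int) (c : List Int),
    (∀ p, p ∈ c ↔ ∃ k, ∃ _ : k < l.length, p = b + k ∧ pvCondA dm atoms (l[k]).2 = true) →
    pvFindB dm atoms l = (PySem.List.min? c id).map (fun p => (l.getD (p - b).toNat (0, [])).1) := by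
  intro l
  induction l with
  | nil =>
    intro b c hc
    have : c = [] := by
      rw [List.eq_nil_iff_forall_not_mem]
      intro p hp
      obtain ⟨k, hk, -, -⟩ := (hc p).mp hp
      simp at hk
    subst this
    simp [pvFindB, PySem.List.min?]
  | cons pb rest ih =>
    intro b c hc
    by_cases hcond : pvCondA dm atoms pb.2 = true
    · have hbmem : b ∈ c := (hc b).mpr ⟨0, by simp, by simp, by simpa using hcond⟩
      have hne : c ≠ [] := fun h => by simp [h] at hbmem
      obtain ⟨p, hp⟩ : ∃ p, PySem.List.min? c id = some p := by
        cases hmin : PySem.List.min? c id with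
        | none => exact absurd ((PySem.List.min?_eq_none_iff c id).mp hmin) hne
        | some p => exact ⟨p, rfl⟩
      have hple : p ≤ b := PySem.List.min?_isMin hp b hbmem
      have hpb : b ≤ p := by
        obtain ⟨k, hk, hpk, -⟩ := (hc p).mp (PySem.List.min?_mem hp)
        omega
      have hpeq : p = b := le_antisymm hple hpb
      simp [pvFindB, hcond, hp, hpeq]
    · have hc' : ∀ p, p ∈ c ↔ ∃ k, ∃ _ : k < rest.length, p = (b + 1) + k ∧ pvCondA dm atoms (rest[k]).2 = true := by
        intro p
        rw [hc]
        constructor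
        · rintro ⟨k, hk, hpk, hcnd⟩
          cases k with
          | zero => simp at hcnd; exact absurd hcnd hcond
          | succ k =>
            exact ⟨k, by simpa using hk, by push_cast at hpk ⊢; omega, by simpa using hcnd⟩
        · rintro ⟨k, hk, hpk, hcnd⟩
          exact ⟨k + 1, by simpa using hk, by push_cast at hpk ⊢; omega, by simpa using hcnd⟩
      rw [pvFindB]
      simp only [hcond]
      rw [ih (b + 1) c hc']
      cases hmin : PySem.List.min? c id with
      | none => simp
      | some p =>
        obtain ⟨k, hk, hpk, -⟩ := (hc' p).mp (PySem.List.min?_mem hmin)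
        have h1 : (p - b).toNat = k + 1 := by omega
        have h2 : (p - (b + 1)).toNat = k := by omega
        simp [h1, h2]

theorem pvStep_eq (dm : PySem.Dict Int Int) (bItems : List (Int × List Int))
    (rm : PySem.Dict Int Int) (pA : Int × List Int) :
    (match pvFindB dm pA.2 bItems with
     | some idxB => rm.insert pA.1 idxB
     | none => rm)
    = (let c := pvCandLoop dm (pvIndexB (bItems.map (·.2))) pA.2
         (PySem.Set.ofList (PySem.List.pyRange 0 ((bItems.map (·.1)).length : Int) 1))
       match PySem.List.min? c id with
       | some p => rm.insert pA.1 ((bItems.map (·.1)).getD p.toNat 0)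
       | none => rm) := by
  have hcm' : ∀ p, p ∈ pvCandLoop dm (pvIndexB (bItems.map (·.2))) pA.2
        (PySem.Set.ofList (PySem.List.pyRange 0 ((bItems.map (·.1)).length : Int) 1))
      ↔ ∃ k, ∃ _ : k < bItems.length, p = 0 + (k : Int) ∧ pvCondA dm pA.2 (bItems[k]).2 = true := by
    intro p
    rw [pvCandLoop_mem]
    rw [PySem.Set.mem_ofList, PySem.List.mem_pyRange_one]
    simp only [List.length_map]
    constructor
    · rintro ⟨⟨hp0, hpn⟩, hall⟩
      refine ⟨p.toNat, by omega, by omega, ?_⟩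
      rw [pvCondA, List.all_eq_true]
      intro x hx
      obtain ⟨m, hm, hmem⟩ := hall x hx
      obtain ⟨k, hk, hpk, hmk⟩ := (pvMemD_indexB _ m p).mp hmem
      have hkk : k = p.toNat := by omega
      subst hkk
      rw [hm]
      simpa using hmk
    · rintro ⟨k, hk, hpk, hcnd⟩
      refine ⟨⟨by omega, by omega⟩, ?_⟩
      intro x hx
      rw [pvCondA, List.all_eq_true] at hcnd
      have := hcnd x hx
      cases hg : dm.get? x with
      | none => rw [hg] at this; simp at this
      | some m =>
        rw [hg] at this
        refine ⟨m, rfl, (pvMemD_indexB _ m p).mpr ⟨k, by simpa using hk, by omega, ?_⟩⟩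
        simp only [List.getElem_map]
        simpa using this
  rw [pvFindB_min dm pA.2 bItems 0 _ hcm']
  simp only [List.length_map] at hcm' ⊢
  cases hmin : PySem.List.min? (pvCandLoop dm (pvIndexB (bItems.map (·.2))) pA.2
      (PySem.Set.ofList (PySem.List.pyRange 0 (bItems.length : Int) 1))) id with
  | none => simp
  | some p =>
    obtain ⟨k, hk, hpk, -⟩ := (hcm' p).mp (PySem.List.min?_mem hmin)
    have hptn : (p - 0).toNat = k := by omega
    have hptn2 : p.toNat = k := by omega
    simp only [Option.map_some, hptn, hptn2]
    congr 1
    rw [List.getD_eq_getElem _ _ hk, List.getD_eq_getElem _ _ (by simpa using hk), List.getElem_map]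

-- ===== VERDICT (by name: the statement is the Claim_ definition above) =====
theorem map_rings_between_molecules_spec : Claim_equal_map_rings_between_molecules := by
  intro ringsA ringsB atom_mapping _
  unfold Spec_map_rings_between_molecules
  simp only [map_rings_between_molecules, map_rings_between_molecules_alt]
  congr 1
  congr 1
  funext rm pA
  exact pvStep_eq (PySem.Dict.ofList atom_mapping) ((PySem.Dict.ofList ringsB).items) rm pA
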